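-- pv_equiv track=rewrite | github.com/thehalleyyoung/halley-labs | marl-interaction-race-verifier/implementation/marace/evaluation/baselines.py | _run_hb_pruning
-- ===== SOURCE A (Python) =====
-- import itertools
--
-- def _run_hb_pruning(
--     groups: list[list[int]],
--     max_depth: int,
-- ) -> list[list[int]]:
--     """Prune schedules using happens-before relations."""
--     schedules: list[list[int]] = []
--     for group in groups:
--         for depth in range(1, min(max_depth + 1, 6)):
--             for combo in itertools.product(group, repeat=depth):
--                 schedules.append(list(combo))
--                 if len(schedules) >= 10_000:
--                     return schedules
--     return schedules
-- ===== SOURCE B (Python) =====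
-- def _decode(group, depth, x):
--     """The x-th (0-based) tuple of itertools.product(group, repeat=depth):
--     x written in base len(group), most significant digit first."""
--     if depth == 0:
--         return []
--     m = len(group)
--     return _decode(group, depth - 1, x // m) + [group[x % m]]
--
--
-- def _run_hb_pruning(
--     groups: list[list[int]],
--     max_depth: int,
-- ) -> list[list[int]]:
--     """Prune schedules using happens-before relations (counting + rank decoding)."""
--     schedules: list[list[int]] = []
--     top = min(max_depth + 1, 6)
--     for group in groups:
--         m = len(group)
--         for depth in range(1, top):
--             take = min(m ** depth, 10_000 - len(schedules))
--             for i in range(take):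
--                 schedules.append(_decode(group, depth, i))
--             if len(schedules) >= 10_000:
--                 return schedules
--     return schedules
-- ===== Notes on version B (the rewrite author's own statement) =====
-- stated objective: alternative
-- what changed: Instead of enumerating itertools.product tuples and testing the cap after every append, B computes arithmetically how many schedules the 10000 cap still admits at each depth (min(m**depth, 10000-len)) and generates exactly that many schedules directly by unranking each index in base len(group).
import Mathlib
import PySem

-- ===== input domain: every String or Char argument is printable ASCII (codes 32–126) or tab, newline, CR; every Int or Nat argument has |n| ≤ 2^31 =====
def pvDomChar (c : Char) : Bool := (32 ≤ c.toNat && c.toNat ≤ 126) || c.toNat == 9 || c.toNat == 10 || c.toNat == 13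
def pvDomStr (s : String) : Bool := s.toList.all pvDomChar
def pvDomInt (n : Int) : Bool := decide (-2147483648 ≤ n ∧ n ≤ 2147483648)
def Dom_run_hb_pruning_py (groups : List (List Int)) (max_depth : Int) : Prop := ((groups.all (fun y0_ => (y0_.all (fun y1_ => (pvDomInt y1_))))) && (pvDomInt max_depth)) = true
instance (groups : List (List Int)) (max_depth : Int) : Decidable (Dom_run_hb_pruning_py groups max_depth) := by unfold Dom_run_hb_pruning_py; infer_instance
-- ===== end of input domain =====

-- B replaces the itertools.product enumeration by counting: it computes arithmetically how many
-- schedules the 10000 cap admits at each depth and generates each one directly by unranking its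
-- index in base len(group); return values proved identical (objective: alternative).

-- ===== PORT A =====

-- itertools.product(group, repeat=depth): depth-fold, last coordinate varies fastest.
def pvProduct (g : List Int) : Nat → List (List Int)
  | 0 => [[]]
  | n+1 => (pvProduct g n).flatMap (fun s => g.map (fun e => s ++ [e]))

-- inner loop of A: append each combo, early-return flag once length reaches 10000
def pvA_combos (sched : List (List Int)) : List (List Int) → List (List Int) × Bool
  | [] => (sched, false)
  | c :: rest =>
    let s := sched ++ [c]
    if 10000 ≤ s.length then (s, true) else pvA_combos s rest

def pvA_depths (sched : List (List Int)) (g : List Int) : List Int → List (List Int) × Bool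
  | [] => (sched, false)
  | d :: ds =>
    match pvA_combos sched (pvProduct g d.toNat) with
    | (s, true) => (s, true)
    | (s, false) => pvA_depths s g ds

def pvA_groups (md : Int) (sched : List (List Int)) : List (List Int) → List (List Int) × Bool
  | [] => (sched, false)
  | g :: gs =>
    match pvA_depths sched g (PySem.List.pyRange 1 (min (md + 1) 6) 1) with
    | (s, true) => (s, true)
    | (s, false) => pvA_groups md s gs

def run_hb_pruning_py (groups : List (List Int)) (max_depth : Int) : List (List Int) :=
  (pvA_groups max_depth [] groups).1

-- ===== PORT B =====

-- _decode(group, depth, x): x unranked in base len(group), most significant digit first.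
-- group[x % m] is always in range when called (0 ≤ x < m^depth), so pyGetD's default is never used.
def pvDecode (g : List Int) : Nat → Int → List Int
  | 0, _ => []
  | d+1, x =>
    pvDecode g d (PySem.Int.floordiv x (g.length : Int)) ++
      [PySem.List.pyGetD g (PySem.Int.mod x (g.length : Int)) 0]

-- for i in range(take): schedules.append(_decode(group, depth, i))
def pvB_inner (g : List Int) (d : Nat) (sched : List (List Int)) : List Int → List (List Int)
  | [] => sched
  | i :: is => pvB_inner g d (sched ++ [pvDecode g d i]) is

def pvB_depths (sched : List (List Int)) (g : List Int) : List Int → List (List Int) × Bool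
  | [] => (sched, false)
  | d :: ds =>
    let take : Int := min ((g.length : Int) ^ d.toNat) (10000 - (sched.length : Int))
    let s := pvB_inner g d.toNat sched (PySem.List.pyRange 0 take 1)
    if 10000 ≤ s.length then (s, true) else pvB_depths s g ds

def pvB_groups (md : Int) (sched : List (List Int)) : List (List Int) → List (List Int) × Bool
  | [] => (sched, false)
  | g :: gs =>
    match pvB_depths sched g (PySem.List.pyRange 1 (min (md + 1) 6) 1) with
    | (s, true) => (s, true)
    | (s, false) => pvB_groups md s gs

def run_hb_pruning_py_alt (groups : List (List Int)) (max_depth : Int) : List (List Int) :=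
  (pvB_groups max_depth [] groups).1

-- ===== PRECONDITION & SPEC =====
def Spec_run_hb_pruning_py (groups : List (List Int)) (max_depth : Int) (out : List (List Int)) : Prop := out = run_hb_pruning_py_alt groups max_depth
instance (groups : List (List Int)) (max_depth : Int) (out : List (List Int)) : Decidable (Spec_run_hb_pruning_py groups max_depth out) := by unfold Spec_run_hb_pruning_py; infer_instance

-- ===== CLAIM (what is proved, stated in full; the proofs are below) =====
def Claim_equal_run_hb_pruning_py : Prop := ∀ (groups : List (List Int)) (max_depth : Int), Dom_run_hb_pruning_py groups max_depth → Spec_run_hb_pruning_py groups max_depth (run_hb_pruning_py groups max_depth)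


-- ===== LEMMAS AND PROOFS =====

-- A's inner loop characterized: append everything if it fits, else a prefix up to 10000 with the flag.
theorem pvA_combos_char (xs : List (List Int)) (sched : List (List Int))
    (h : sched.length < 10000) :
    pvA_combos sched xs =
      if sched.length + xs.length < 10000 then (sched ++ xs, false)
      else (sched ++ xs.take (10000 - sched.length), true) := by
  induction xs generalizing sched with
  | nil => simp [pvA_combos, h]
  | cons c rest ih =>
    show (if 10000 ≤ (sched ++ [c]).length then (sched ++ [c], true)
          else pvA_combos (sched ++ [c]) rest) = _
    have hl : (sched ++ [c]).length = sched.length + 1 := by simp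
    by_cases hfull : 10000 ≤ sched.length + 1
    · rw [if_pos (by omega)]
      have hc : ¬ (sched.length + (c :: rest).length < 10000) := by simp; omega
      rw [if_neg hc]
      have h1 : 10000 - sched.length = 1 := by omega
      simp [h1]
    · rw [if_neg (by omega), ih _ (by omega)]
      by_cases hc : sched.length + 1 + rest.length < 10000
      · rw [if_pos (by simp; omega), if_pos (by simp; omega)]
        simp
      · rw [if_neg (by simp; omega), if_neg (by simp; omega)]
        have ht : 10000 - sched.length = (10000 - ((sched ++ [c]).length)) + 1 := by
          simp; omega
        rw [ht, List.take_succ_cons]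
        simp

theorem pvB_inner_eq (idxs : List Int) (g : List Int) (d : Nat) (sched : List (List Int)) :
    pvB_inner g d sched idxs = sched ++ idxs.map (pvDecode g d) := by
  induction idxs generalizing sched with
  | nil => simp [pvB_inner]
  | cons i is ih => simp [pvB_inner, ih]

theorem range_mul_flatMap {α : Type} (n m : Nat) (f : Nat → α) :
    (List.range (n * m)).map f
      = (List.range n).flatMap (fun q => (List.range m).map (fun r => f (q * m + r))) := by
  induction n with
  | zero => simp
  | succ k ih =>
    have h : (k + 1) * m = k * m + m := by ring
    rw [h, List.range_add, List.map_append, ih, List.range_succ, List.flatMap_append]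
    simp [Function.comp_def]

theorem decode_succ_row (g : List Int) (k : Nat) (q : Nat) :
    (List.range g.length).map (fun r => pvDecode g (k + 1) ((q * g.length + r : Nat) : Int))
      = g.map (fun e => pvDecode g k (q : Int) ++ [e]) := by
  apply List.ext_getElem (by simp)
  intro r h1 h2
  have hr : r < g.length := by simpa using h2
  simp only [List.getElem_map, List.getElem_range]
  show pvDecode g (k + 1) ((q * g.length + r : Nat) : Int) = _
  rw [pvDecode]
  have hdiv : (q * g.length + r) / g.length = q := by
    rw [Nat.add_comm, Nat.add_mul_div_right _ _ (by omega : 0 < g.length),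
        Nat.div_eq_of_lt hr]
    omega
  have hmod : (q * g.length + r) % g.length = r := by
    rw [Nat.add_comm, Nat.add_mul_mod_self_right, Nat.mod_eq_of_lt hr]
  rw [PySem.Int.floordiv_natCast, PySem.Int.mod_natCast, hdiv, hmod,
      PySem.List.pyGetD_natCast, List.getD_eq_getElem _ _ hr]

-- the product list IS the list of unranked indices
theorem pvProduct_eq_decode (g : List Int) (d : Nat) :
    pvProduct g d = (List.range (g.length ^ d)).map (fun x : Nat => pvDecode g d (x : Int)) := by
  induction d with
  | zero => simp [pvProduct, pvDecode]
  | succ k ih =>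
    rw [pvProduct, ih, List.flatMap_map, pow_succ, range_mul_flatMap]
    exact congrFun (congrArg List.flatMap (funext fun q => by
      simpa [Function.comp_def] using (decode_succ_row g k q).symm)) _

theorem length_pvProduct (g : List Int) (d : Nat) :
    (pvProduct g d).length = g.length ^ d := by
  rw [pvProduct_eq_decode]; simp

theorem map_decode_range (g : List Int) (dd t : Nat) (ht : t ≤ g.length ^ dd) :
    (List.range t).map (fun x : Nat => pvDecode g dd (x : Int)) = (pvProduct g dd).take t := by
  rw [pvProduct_eq_decode, ← List.map_take, List.take_range]
  congr 2
  omega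

theorem pvB_depths_eq (ds : List Int) (g : List Int) (sched : List (List Int))
    (h : sched.length < 10000) :
    pvB_depths sched g ds = pvA_depths sched g ds := by
  induction ds generalizing sched with
  | nil => rfl
  | cons d ds ih =>
    have hcast : ((g.length ^ d.toNat : Nat) : Int) = (g.length : Int) ^ d.toNat := by
      push_cast; ring
    have htk : (min ((g.length : Int) ^ d.toNat) (10000 - (sched.length : Int))).toNat
        = min (g.length ^ d.toNat) (10000 - sched.length) := by
      rw [← hcast]; omega
    have hB : pvB_inner g d.toNat sched
          (PySem.List.pyRange 0 (min ((g.length : Int) ^ d.toNat) (10000 - (sched.length : Int))) 1)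
        = sched ++ (pvProduct g d.toNat).take (min (g.length ^ d.toNat) (10000 - sched.length)) := by
      rw [PySem.List.pyRange_one, pvB_inner_eq, List.map_map]
      have h0 : (min ((g.length : Int) ^ d.toNat) (10000 - (sched.length : Int)) - 0).toNat
          = min (g.length ^ d.toNat) (10000 - sched.length) := by
        rw [← htk]; congr 1; omega
      rw [h0]
      congr 1
      have hmap : (pvDecode g d.toNat ∘ fun k : Nat => (0 : Int) + (k : Int))
          = fun x : Nat => pvDecode g d.toNat (x : Int) := by
        funext k; simp
      rw [hmap, map_decode_range _ _ _ (by omega)]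
    simp only [pvB_depths, pvA_depths]
    rw [hB, pvA_combos_char _ _ h, length_pvProduct]
    by_cases hfit : sched.length + g.length ^ d.toNat < 10000
    · have hmin : min (g.length ^ d.toNat) (10000 - sched.length) = g.length ^ d.toNat := by
        omega
      rw [if_pos hfit, hmin, List.take_of_length_le (by rw [length_pvProduct])]
      have hlt : ¬ 10000 ≤ (sched ++ pvProduct g d.toNat).length := by
        simp [length_pvProduct]; omega
      rw [if_neg hlt]
      exact ih _ (by simp [length_pvProduct]; omega)
    · have hmin : min (g.length ^ d.toNat) (10000 - sched.length) = 10000 - sched.length := by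
        omega
      rw [if_neg hfit, hmin]
      have hlen : (sched ++ (pvProduct g d.toNat).take (10000 - sched.length)).length = 10000 := by
        simp [length_pvProduct]; omega
      rw [if_pos (by omega)]

theorem pvA_depths_false_lt (ds : List Int) (g : List Int) (sched : List (List Int))
    (h : sched.length < 10000)
    (hf : (pvA_depths sched g ds).2 = false) :
    (pvA_depths sched g ds).1.length < 10000 := by
  induction ds generalizing sched with
  | nil => simpa [pvA_depths] using h
  | cons d ds ih =>
    simp only [pvA_depths] at hf ⊢
    rw [pvA_combos_char _ _ h] at hf ⊢
    by_cases hfit : sched.length + (pvProduct g d.toNat).length < 10000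
    · rw [if_pos hfit] at hf ⊢
      exact ih _ (by simp; omega) hf
    · rw [if_neg hfit] at hf
      simp at hf

theorem pvB_groups_eq (groups : List (List Int)) : ∀ (md : Int) (sched : List (List Int)),
    sched.length < 10000 → pvB_groups md sched groups = pvA_groups md sched groups := by
  induction groups with
  | nil => intro md sched _; rfl
  | cons g gs ih =>
    intro md sched h
    simp only [pvB_groups, pvA_groups]
    rw [pvB_depths_eq _ _ _ h]
    rcases he : pvA_depths sched g (PySem.List.pyRange 1 (min (md + 1) 6) 1) with ⟨s, done⟩
    cases done
    · exact ih md s (by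
        have := pvA_depths_false_lt (PySem.List.pyRange 1 (min (md + 1) 6) 1) g sched h
          (by rw [he])
        rwa [he] at this)
    · rfl

-- ===== VERDICT (by name: the statement is the Claim_ definition above) =====
theorem run_hb_pruning_py_spec : Claim_equal_run_hb_pruning_py := by
  intro groups max_depth _
  unfold Spec_run_hb_pruning_py run_hb_pruning_py run_hb_pruning_py_alt
  rw [pvB_groups_eq groups max_depth [] (by simp)]
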